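-- pv_equiv track=rewrite | github.com/LeonSavi/T-M-Project | BI_scraper.py | return_keySentences
-- ===== SOURCE A (Python) =====
-- def return_keySentences(sentences: list, keywords: list):
--     keywords_lower = [kw.lower() for kw in keywords]
--     key_sentences = []
--
--     for sent in sentences:
--         sent_lower = sent.lower()
--
--         if any(kw in sent_lower for kw in keywords_lower):
--             key_sentences.append(sent.strip())
--
--     return ' '.join(key_sentences)
-- ===== SOURCE B (Python) =====
-- def return_keySentences(sentences: list, keywords: list):
--     # keyword-outer shrinking worklist: start from all (index, lowered sentence)
--     # pairs, drop a pair for good once some keyword matched it, and finally join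
--     # the stripped sentences whose index was dropped from the worklist
--     unhit = [(i, s.lower()) for i, s in enumerate(sentences)]
--     for kw in keywords:
--         k = kw.lower()
--         unhit = [p for p in unhit if k not in p[1]]
--     miss = {p[0] for p in unhit}
--     return ' '.join(s.strip() for i, s in enumerate(sentences) if i not in miss)
-- ===== Notes on version B (the rewrite author's own statement) =====
-- stated objective: alternative
-- what changed: A loops sentence-outer with an inner any() over keywords, appending matches as it goes; B inverts the traversal into a keyword-outer shrinking worklist of (index, lowered sentence) pairs - each keyword filters the worklist, a sentence leaves it for good on its first match, and the survivors' indices form the miss-set used to join the stripped matching sentences.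
import Mathlib
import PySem

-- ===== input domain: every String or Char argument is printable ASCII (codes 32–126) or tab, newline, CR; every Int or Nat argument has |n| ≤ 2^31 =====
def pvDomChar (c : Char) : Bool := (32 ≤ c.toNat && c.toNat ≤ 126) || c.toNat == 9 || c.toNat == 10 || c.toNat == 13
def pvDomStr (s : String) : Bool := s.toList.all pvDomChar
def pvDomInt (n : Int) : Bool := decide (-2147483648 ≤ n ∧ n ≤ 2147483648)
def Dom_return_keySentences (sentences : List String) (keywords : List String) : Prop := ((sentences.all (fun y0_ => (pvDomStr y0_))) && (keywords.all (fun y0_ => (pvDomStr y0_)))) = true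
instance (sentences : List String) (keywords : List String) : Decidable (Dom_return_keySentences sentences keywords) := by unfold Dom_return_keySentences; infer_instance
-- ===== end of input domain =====

-- B replaces A's sentence-outer loop with an inner any() by a keyword-outer marking
-- sweep over a precomputed lowered-sentence/hit array (alternative decomposition).


-- ===== PORT A =====
def return_keySentences (sentences : List String) (keywords : List String) : String :=
  let keywords_lower := keywords.map (fun kw => PySem.Str.lower kw)
  let key_sentences := sentences.foldl (fun acc sent =>
    let sent_lower := PySem.Str.lower sent
    if keywords_lower.any (fun kw => PySem.Str.isIn kw sent_lower) then acc ++ [PySem.Str.strip sent]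
    else acc) []
  PySem.Str.join " " key_sentences

-- ===== PORT B =====
def return_keySentences_alt (sentences : List String) (keywords : List String) : String :=
  let unhit0 := (PySem.List.enumerate sentences).map (fun p => (p.1, PySem.Str.lower p.2))
  let unhit := keywords.foldl (fun u kw =>
    let k := PySem.Str.lower kw
    u.filter (fun p => !PySem.Str.isIn k p.2)) unhit0
  let miss := PySem.Set.ofList (unhit.map (fun p => p.1))
  PySem.Str.join " " (((PySem.List.enumerate sentences).filter
      (fun p => !(PySem.Set.contains miss p.1))).map (fun p => PySem.Str.strip p.2))

-- ===== PRECONDITION & SPEC =====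
def Spec_return_keySentences (sentences : List String) (keywords : List String) (out : String) : Prop := out = return_keySentences_alt sentences keywords
instance (sentences : List String) (keywords : List String) (out : String) : Decidable (Spec_return_keySentences sentences keywords out) := by unfold Spec_return_keySentences; infer_instance

-- ===== CLAIM (what is proved, stated in full; the proofs are below) =====
def Claim_equal_return_keySentences : Prop := ∀ (sentences : List String) (keywords : List String), Dom_return_keySentences sentences keywords → Spec_return_keySentences sentences keywords (return_keySentences sentences keywords)

-- ===== LEMMAS AND PROOFS =====

-- B's keyword-outer fold is one filter by 'no keyword matches'
theorem unhit_fold (kws : List String) (l : List (Int × String)) :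
    kws.foldl (fun u kw => u.filter (fun p => !PySem.Str.isIn (PySem.Str.lower kw) p.2)) l
    = l.filter (fun p => !kws.any (fun kw => PySem.Str.isIn (PySem.Str.lower kw) p.2)) := by
  induction kws generalizing l with
  | nil => simp
  | cons k rest ih =>
    simp only [List.foldl_cons, ih, List.filter_filter]
    apply List.filter_congr
    intro p _
    simp only [List.any_cons, Bool.not_or]
    rw [Bool.and_comm]

-- contains on a Python set built from a list is contains on the list
theorem set_contains_ofList {α : Type} [BEq α] [LawfulBEq α] (l : List α) (x : α) :
    PySem.Set.contains (PySem.Set.ofList l) x = l.contains x := by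
  cases h : l.contains x with
  | true =>
    have hx : x ∈ l := by simpa using h
    have : PySem.Set.contains (PySem.Set.ofList l) x = true :=
      (PySem.Set.contains_iff _ _).mpr ((PySem.Set.mem_ofList _ _).mpr hx)
    rw [this]
  | false =>
    have hx : x ∉ l := by simpa using h
    cases h2 : PySem.Set.contains (PySem.Set.ofList l) x with
    | true =>
      exact absurd ((PySem.Set.mem_ofList _ _).mp ((PySem.Set.contains_iff _ _).mp h2)) hx
    | false => rfl

-- an enumerate index survives the filtered worklist iff the predicate holds at that index
theorem idx_mem_filter_enumerate (xs : List String) (q : Int × String → Bool)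
    (k : Nat) (hk : k < xs.length) :
    (((PySem.List.enumerate xs).filter q).map (fun p => p.1)).contains ((0 : Int) + k)
      = q ((0 : Int) + k, xs[k]) := by
  cases h : q ((0 : Int) + k, xs[k]) with
  | false =>
    simp only [List.contains_eq_mem, decide_eq_false_iff_not, List.mem_map, List.mem_filter,
      PySem.List.mem_enumerate_iff, not_exists, not_and]
    rintro ⟨i, t⟩ ⟨⟨k', hk', hp⟩, hq⟩ hi
    cases hp
    simp only at hi
    have : k' = k := by omega
    subst this
    rw [h] at hq
    exact absurd hq (by simp)
  | true =>
    simp only [List.contains_eq_mem, decide_eq_true_eq, List.mem_map]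
    exact ⟨((0 : Int) + k, xs[k]), List.mem_filter.mpr ⟨(PySem.List.mem_enumerate_iff _ _ _).mpr ⟨k, hk, rfl⟩, h⟩, rfl⟩

-- filtering/mapping enumerate by a predicate/function of the element only
theorem filter_map_enumerate (xs : List String) (q : String → Bool) (f : String → String) :
    ∀ (s : Int), (((PySem.List.enumerate xs s).filter (fun p => q p.2)).map (fun p => f p.2))
      = (xs.filter q).map f := by
  induction xs with
  | nil => intro s; rfl
  | cons x t ih =>
    intro s
    rw [PySem.List.enumerate_cons]
    cases h : q x <;> simp [h, ih]

theorem return_keySentences_eq (sentences keywords : List String) :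
    return_keySentences sentences keywords = return_keySentences_alt sentences keywords := by
  unfold return_keySentences return_keySentences_alt
  simp only [PySem.List.foldl_append_if, List.nil_append, unhit_fold, List.filter_map,
    List.map_map, Function.comp_def, List.any_map]
  congr 1
  rw [← filter_map_enumerate sentences
        (fun s => keywords.any (fun kw => PySem.Str.isIn (PySem.Str.lower kw) (PySem.Str.lower s)))
        PySem.Str.strip 0]
  congr 1
  apply List.filter_congr
  intro p hp
  rcases (PySem.List.mem_enumerate_iff _ _ _).mp hp with ⟨k, hk, hpk⟩
  subst hpk
  simp only [set_contains_ofList, idx_mem_filter_enumerate sentences _ k hk]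
  simp

-- ===== VERDICT (by name: the statement is the Claim_ definition above) =====
theorem return_keySentences_spec : Claim_equal_return_keySentences := by
  intro sentences keywords _
  exact return_keySentences_eq sentences keywords
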